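-- pv_equiv track=rewrite | github.com/Signature-Sound-Vienna/alignment | compare-time-maps.py | compare_time_maps
-- ===== SOURCE A (Python) =====
-- def compare_time_maps(time_map1, time_map2):
--     # Filter the time maps to keep only entries with "on" key
--     time_map1_filtered = [entry for entry in time_map1 if "on" in entry]
--     time_map2_filtered = [entry for entry in time_map2 if "on" in entry]
--
--     # Compare the "qstamp" values of the two time maps
--     # Output only the qstamp values that exist in one time map but not in the other
--     differences = [
--     ]
--     for entry in time_map1_filtered:
--         if entry["qstamp"] not in [entry["qstamp"] for entry in time_map2_filtered]:
--             differences.append({ entry["qstamp"]: "only_in_1" })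
--     for entry in time_map2_filtered:
--         if entry["qstamp"] not in [entry["qstamp"] for entry in time_map1_filtered]:
--             differences.append({ entry["qstamp"]: "only_in_2" })
--
--     # order the differences by qstamp
--     differences.sort(key=lambda x: list(x.keys())[0])
--     return differences
-- ===== SOURCE B (Python) =====
-- def compare_time_maps(time_map1, time_map2):
--     # Count, per qstamp, how many "on" entries carry it in each map (one pass per map),
--     # then emit the exclusive qstamps in sorted order, once per occurrence.
--     c1 = {}
--     for entry in time_map1:
--         if "on" in entry:
--             q = entry["qstamp"]
--             c1[q] = c1.get(q, 0) + 1
--     c2 = {}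
--     for entry in time_map2:
--         if "on" in entry:
--             q = entry["qstamp"]
--             c2[q] = c2.get(q, 0) + 1
--     only1 = [q for q in c1 if q not in c2]
--     only2 = [q for q in c2 if q not in c1]
--     out = []
--     for q in sorted(only1 + only2):
--         if q in c1:
--             out += [{q: "only_in_1"}] * c1[q]
--         else:
--             out += [{q: "only_in_2"}] * c2[q]
--     return out
-- ===== Notes on version B (the rewrite author's own statement) =====
-- stated objective: alternative
-- what changed: Replaces A's per-entry rescans of the other map's qstamp list (and the trailing sort of the whole difference list) by two qstamp->count dictionaries built in one pass each, then emits the exclusive qstamps in sorted order once per occurrence.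
import Mathlib
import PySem

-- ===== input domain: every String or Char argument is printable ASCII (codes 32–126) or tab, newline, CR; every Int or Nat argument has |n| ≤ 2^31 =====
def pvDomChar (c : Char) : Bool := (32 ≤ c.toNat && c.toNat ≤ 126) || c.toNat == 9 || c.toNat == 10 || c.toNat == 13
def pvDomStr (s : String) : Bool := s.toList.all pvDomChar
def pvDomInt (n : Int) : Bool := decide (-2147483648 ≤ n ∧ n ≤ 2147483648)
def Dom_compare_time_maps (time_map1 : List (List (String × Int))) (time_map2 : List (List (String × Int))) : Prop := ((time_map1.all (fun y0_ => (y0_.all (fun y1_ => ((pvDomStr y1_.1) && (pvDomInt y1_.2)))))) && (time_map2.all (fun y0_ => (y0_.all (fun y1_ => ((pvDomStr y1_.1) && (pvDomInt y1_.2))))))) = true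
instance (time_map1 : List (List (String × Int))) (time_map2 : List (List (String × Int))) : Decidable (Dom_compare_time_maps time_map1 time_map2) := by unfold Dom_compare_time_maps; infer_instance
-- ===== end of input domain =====

-- B replaces A's repeated inner membership scans by two count dictionaries built in one
-- pass each, then emits the exclusive qstamps in sorted order (objective: alternative).

-- Each entry (a Python dict) is an association list; '"on" in entry' is a key test.
def pvOn (e : List (String × Int)) : Bool := (PySem.Dict.mk e).contains "on"
-- entry["qstamp"]: Python raises KeyError when absent; those inputs are excluded by
-- Pre_compare_time_maps, so the .getD 0 default is never the value looked up.
def pvQ (e : List (String × Int)) : Int := ((PySem.Dict.mk e).get? "qstamp").getD 0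

-- ===== PORT A =====
def compare_time_maps (time_map1 : List (List (String × Int))) (time_map2 : List (List (String × Int))) : List (List (Int × String)) :=
  let f1 := time_map1.filter (fun e => pvOn e)
  let f2 := time_map2.filter (fun e => pvOn e)
  let d1 := f1.foldl (fun acc e =>
      if pvQ e ∉ f2.map (fun e2 => pvQ e2) then acc ++ [[(pvQ e, "only_in_1")]] else acc) []
  let d2 := f2.foldl (fun acc e =>
      if pvQ e ∉ f1.map (fun e2 => pvQ e2) then acc ++ [[(pvQ e, "only_in_2")]] else acc) d1
  -- differences.sort(key=lambda x: list(x.keys())[0]); every dict in the list is a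
  -- singleton {qstamp: tag}, so its first key is the first pair's first component
  PySem.List.sorted d2 (fun x => (x.headD (0, "")).1) false

-- ===== PORT B =====
def compare_time_maps_alt (time_map1 : List (List (String × Int))) (time_map2 : List (List (String × Int))) : List (List (Int × String)) :=
  -- c[q] = c.get(q, 0) + 1 under the "on" guard
  let c1 := time_map1.foldl (fun d e => if pvOn e then d.modify (pvQ e) 0 (fun n => n + 1) else d) (PySem.Dict.empty : PySem.Dict Int Int)
  let c2 := time_map2.foldl (fun d e => if pvOn e then d.modify (pvQ e) 0 (fun n => n + 1) else d) (PySem.Dict.empty : PySem.Dict Int Int)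
  let only1 := c1.keys.filter (fun q => ! c2.contains q)
  let only2 := c2.keys.filter (fun q => ! c1.contains q)
  (PySem.List.sorted (only1 ++ only2) (fun q => q) false).foldl
    (fun out q =>
      if c1.contains q then out ++ List.replicate (c1.getD q 0).toNat [(q, "only_in_1")]
      else out ++ List.replicate (c2.getD q 0).toNat [(q, "only_in_2")]) []

-- ===== PRECONDITION & SPEC =====
-- Pre_ excludes exactly the inputs where the Python A raises KeyError: an entry that
-- has an "on" key but no "qstamp" key (B raises there too).
def Pre_compare_time_maps (time_map1 : List (List (String × Int))) (time_map2 : List (List (String × Int))) : Prop :=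
  ∀ e ∈ time_map1 ++ time_map2, pvOn e = true → (PySem.Dict.mk e).contains "qstamp" = true
instance (time_map1 : List (List (String × Int))) (time_map2 : List (List (String × Int))) : Decidable (Pre_compare_time_maps time_map1 time_map2) := by unfold Pre_compare_time_maps; infer_instance

def pvWitness_compare_time_maps : (List (List (String × Int))) × (List (List (String × Int))) :=
  ([[("on", 1), ("qstamp", 3)], [("qstamp", 5)]], [[("on", 2), ("qstamp", 4)]])

def Spec_compare_time_maps (time_map1 : List (List (String × Int))) (time_map2 : List (List (String × Int))) (out : List (List (Int × String))) : Prop := out = compare_time_maps_alt time_map1 time_map2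
instance (time_map1 : List (List (String × Int))) (time_map2 : List (List (String × Int))) (out : List (List (Int × String))) : Decidable (Spec_compare_time_maps time_map1 time_map2 out) := by unfold Spec_compare_time_maps; infer_instance

-- ===== CLAIM (what is proved, stated in full; the proofs are below) =====
def Claim_equal_compare_time_maps : Prop := ∀ (time_map1 : List (List (String × Int))) (time_map2 : List (List (String × Int))), Dom_compare_time_maps time_map1 time_map2 → Pre_compare_time_maps time_map1 time_map2 → Spec_compare_time_maps time_map1 time_map2 (compare_time_maps time_map1 time_map2)

-- ===== LEMMAS AND PROOFS =====

-- insertBy commutes with mapping h when the key of (h a) is a itself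
theorem pv_insertBy_map {β : Type} (h : Int → β) (key : β → Int) (hk : ∀ a, key (h a) = a)
    (q : Int) (ys : List Int) :
    PySem.List.insertBy (fun a b => decide (key a < key b)) (h q) (ys.map h)
      = (PySem.List.insertBy (fun a b => decide (a < b)) q ys).map h := by
  induction ys with
  | nil => simp [PySem.List.insertBy]
  | cons y t ih =>
    simp only [List.map_cons, PySem.List.insertBy, hk]
    split <;> simp_all

theorem pv_foldl_insertBy_map {β : Type} (h : Int → β) (key : β → Int) (hk : ∀ a, key (h a) = a)
    (m : List Int) (acc : List Int) :
    m.foldl (fun acc q => PySem.List.insertBy (fun a b => decide (key a < key b)) (h q) acc) (acc.map h)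
      = (m.foldl (fun acc q => PySem.List.insertBy (fun a b => decide (a < b)) q acc) acc).map h := by
  induction m generalizing acc with
  | nil => rfl
  | cons q t ih =>
    simp only [List.foldl_cons, pv_insertBy_map h key hk]
    exact ih _

-- stable sort of a list of h-images, keyed by the value h was applied to
theorem pv_sorted_map {β : Type} (h : Int → β) (key : β → Int) (hk : ∀ a, key (h a) = a)
    (m : List Int) :
    PySem.List.sorted (m.map h) key false = (PySem.List.sorted m (fun x => x) false).map h := by
  rw [PySem.List.sorted_eq_foldl_insertBy, PySem.List.sorted_eq_foldl_insertBy, List.foldl_map]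
  simpa using pv_foldl_insertBy_map h key hk m []

-- blocks of equal elements over strictly increasing heads are sorted
theorem pv_pairwise_le_flatMap (ks : List Int) (n : Int → Nat) (h : ks.Pairwise (· < ·)) :
    (ks.flatMap (fun q => List.replicate (n q) q)).Pairwise (· ≤ ·) := by
  induction ks with
  | nil => simp
  | cons k t ih =>
    rw [List.pairwise_cons] at h
    rw [List.flatMap_cons, List.pairwise_append]
    refine ⟨List.pairwise_replicate.2 (Or.inr le_rfl), ih h.2, ?_⟩
    intro a ha b hb
    rw [List.eq_of_mem_replicate ha]
    rcases List.mem_flatMap.1 hb with ⟨q, hq, hbq⟩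
    rw [List.eq_of_mem_replicate hbq]
    exact le_of_lt (h.1 q hq)

theorem pv_count_flatMap_replicate (ks : List Int) (n : Int → Nat) (hnd : ks.Nodup) (v : Int) :
    (ks.flatMap (fun q => List.replicate (n q) q)).count v = if v ∈ ks then n v else 0 := by
  induction ks with
  | nil => simp
  | cons k t ih =>
    rw [List.nodup_cons] at hnd
    rw [List.flatMap_cons, List.count_append, ih hnd.2, List.count_replicate]
    by_cases hv : v = k
    · subst hv; simp [hnd.1]
    · simp [hv, Ne.symm hv]

-- the canonical form of a sorted Int list: its sorted distinct values, each repeated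
-- as many times as it occurs
theorem pv_sorted_eq_flatMap (m ks : List Int) (hnd : ks.Nodup) (hmem : ∀ q, q ∈ ks ↔ q ∈ m) :
    PySem.List.sorted m (fun x => x) false
      = (PySem.List.sorted ks (fun x => x) false).flatMap (fun q => List.replicate (m.count q) q) := by
  have hperm : (PySem.List.sorted ks (fun x => x) false).Perm ks := PySem.List.sorted_perm ks _ false
  have hnd' : (PySem.List.sorted ks (fun x => x) false).Nodup := hperm.nodup_iff.2 hnd
  have hlt : (PySem.List.sorted ks (fun x => x) false).Pairwise (· < ·) :=
    ((PySem.List.sorted_pairwise ks (fun x => x)).and hnd').imp (fun h => lt_of_le_of_ne h.1 h.2)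
  refine PySem.List.sorted_id_eq_of_perm_of_pairwise _ _ ?_ ?_
  · refine List.perm_iff_count.2 (fun v => ?_)
    rw [pv_count_flatMap_replicate _ _ hnd' v]
    by_cases hv : v ∈ PySem.List.sorted ks (fun x => x) false
    · simp [hv]
    · have : v ∉ m := fun hm => hv (hperm.mem_iff.2 ((hmem v).2 hm))
      simp [hv, List.count_eq_zero.2 this]
  · exact pv_pairwise_le_flatMap _ _ hlt

-- the guarded counting loop of B is the Counter of the filtered qstamp list
theorem pv_counter_loop (tm : List (List (String × Int))) :
    tm.foldl (fun d e => if pvOn e then d.modify (pvQ e) 0 (fun n => n + 1) else d) (PySem.Dict.empty : PySem.Dict Int Int)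
      = PySem.Dict.counter ((tm.filter (fun e => pvOn e)).map pvQ) := by
  rw [PySem.Dict.counter_eq_foldl, List.foldl_map, ← PySem.List.foldl_if_eq_foldl_filter]

-- ===== VERDICT (by name: the statement is the Claim_ definition above) =====
-- proof-only helper: the singleton dict a (filtered) qstamp q gives rise to
def pvH (q2 : List Int) (q : Int) : List (Int × String) :=
  if q ∈ q2 then [(q, "only_in_2")] else [(q, "only_in_1")]

theorem pvH_key (q2 : List Int) (a : Int) : (((pvH q2 a).headD (0, "")).1) = a := by
  unfold pvH; split <;> rfl

-- the heart of the equivalence, stated over the filtered entry lists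
theorem pv_core (f1 f2 : List (List (String × Int))) :
    PySem.List.sorted
      ((f1.filter (fun x => decide (pvQ x ∉ f2.map (fun e2 => pvQ e2)))).map (fun e => [(pvQ e, "only_in_1")])
        ++ (f2.filter (fun x => decide (pvQ x ∉ f1.map (fun e2 => pvQ e2)))).map (fun e => [(pvQ e, "only_in_2")]))
      (fun x => (x.headD (0, "")).1) false
    = List.foldl (fun out q =>
        if (PySem.Dict.counter (f1.map pvQ)).contains q = true then
          out ++ List.replicate ((PySem.Dict.counter (f1.map pvQ)).getD q 0).toNat [(q, "only_in_1")]
        else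
          out ++ List.replicate ((PySem.Dict.counter (f2.map pvQ)).getD q 0).toNat [(q, "only_in_2")]) []
      (PySem.List.sorted
        (((PySem.Dict.counter (f1.map pvQ)).keys.filter (fun q => !(PySem.Dict.counter (f2.map pvQ)).contains q))
          ++ ((PySem.Dict.counter (f2.map pvQ)).keys.filter (fun q => !(PySem.Dict.counter (f1.map pvQ)).contains q)))
        (fun q => q) false) := by
  have e1 : (f1.filter (fun x => decide (pvQ x ∉ f2.map (fun e2 => pvQ e2)))).map
        (fun e => [((pvQ e : Int), ("only_in_1" : String))])
      = ((f1.map pvQ).filter (fun q => decide (q ∉ f2.map pvQ))).map (fun q => [(q, "only_in_1")]) := by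
    rw [List.filter_map, List.map_map]; rfl
  have e2 : (f2.filter (fun x => decide (pvQ x ∉ f1.map (fun e2 => pvQ e2)))).map
        (fun e => [((pvQ e : Int), ("only_in_2" : String))])
      = ((f2.map pvQ).filter (fun q => decide (q ∉ f1.map pvQ))).map (fun q => [(q, "only_in_2")]) := by
    rw [List.filter_map, List.map_map]; rfl
  rw [e1, e2]
  -- abbreviate the two qstamp lists
  generalize f1.map pvQ = q1, f2.map pvQ = q2
  -- the unsorted difference list consists of pvH-images of the exclusive qstamps
  have hm1 : ((q1.filter (fun q => decide (q ∉ q2))).map (fun q => [(q, "only_in_1")]))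
      = (q1.filter (fun q => decide (q ∉ q2))).map (pvH q2) := by
    refine List.map_congr_left (fun q hq => ?_)
    have : q ∉ q2 := by simpa using (List.mem_filter.1 hq).2
    simp [pvH, this]
  have hm2 : ((q2.filter (fun q => decide (q ∉ q1))).map (fun q => [(q, "only_in_2")]))
      = (q2.filter (fun q => decide (q ∉ q1))).map (pvH q2) := by
    refine List.map_congr_left (fun q hq => ?_)
    have : q ∈ q2 := List.mem_of_mem_filter hq
    simp [pvH, this]
  rw [hm1, hm2, ← List.map_append]
  rw [pv_sorted_map (pvH q2) (fun x => (x.headD (0, "")).1) (pvH_key q2)]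
  -- name the exclusive-key list and the occurrence multiset
  simp only [PySem.Dict.keys_counter, PySem.Dict.contains_counter, PySem.Dict.getD_counter]
  set mx : List Int := q1.filter (fun q => decide (q ∉ q2)) ++ q2.filter (fun q => decide (q ∉ q1)) with hmx
  set ks : List Int := (PySem.Set.ofList q1).filter (fun q => !q2.contains q)
      ++ (PySem.Set.ofList q2).filter (fun q => !q1.contains q) with hks
  have hnd : ks.Nodup := by
    refine List.Nodup.append ((PySem.Set.nodup_ofList q1).filter _)
      ((PySem.Set.nodup_ofList q2).filter _) ?_
    intro q hqa hqb
    have h1 : q ∈ q1 := (PySem.Set.mem_ofList q1 q).1 (List.mem_of_mem_filter hqa)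
    have h2 : q ∉ q1 := by
      have := (List.mem_filter.1 hqb).2
      simpa [List.contains_iff_mem] using this
    exact h2 h1
  have hmem : ∀ q, q ∈ ks ↔ q ∈ mx := by
    intro q
    simp [hks, hmx, List.mem_filter, PySem.Set.mem_ofList]
  rw [pv_sorted_eq_flatMap mx ks hnd hmem]
  simp only [List.map_flatMap, List.map_replicate]
  -- B-side loop: append of a per-key block
  have hfun : (fun (out : List (List (Int × String))) (q : Int) =>
        if q1.contains q = true then out ++ List.replicate ((q1.count q : Int)).toNat [(q, "only_in_1")]
        else out ++ List.replicate ((q2.count q : Int)).toNat [(q, "only_in_2")])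
      = fun out q => out ++ (if q1.contains q = true then List.replicate ((q1.count q : Int)).toNat [(q, "only_in_1")]
        else List.replicate ((q2.count q : Int)).toNat [(q, "only_in_2")]) := by
    funext out q; split <;> rfl
  rw [hfun, PySem.List.foldl_append_eq_flatMap, List.nil_append]
  refine List.flatMap_congr (fun q hq => ?_)
  have hq' : q ∈ ks := (PySem.List.mem_sorted _ _ _ _).1 hq
  simp only [Int.toNat_natCast]
  rcases List.mem_append.1 hq' with hqa | hqb
  · have h1 : q ∈ q1 := (PySem.Set.mem_ofList q1 q).1 (List.mem_of_mem_filter hqa)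
    have h2 : q ∉ q2 := by
      have := (List.mem_filter.1 hqa).2
      simpa [List.contains_iff_mem] using this
    have hcnt : mx.count q = q1.count q := by
      rw [hmx, List.count_append, List.count_filter (by simpa using h2)]
      have hz : q ∉ q2.filter (fun q => decide (q ∉ q1)) := fun hm => h2 (List.mem_of_mem_filter hm)
      rw [List.count_eq_zero.2 hz]
      simp
    rw [hcnt, if_pos (List.contains_iff_mem.2 h1)]
    simp [pvH, h2]
  · have h1 : q ∈ q2 := (PySem.Set.mem_ofList q2 q).1 (List.mem_of_mem_filter hqb)
    have h2 : q ∉ q1 := by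
      have := (List.mem_filter.1 hqb).2
      simpa [List.contains_iff_mem] using this
    have hcnt : mx.count q = q2.count q := by
      rw [hmx, List.count_append]
      have hz : q ∉ q1.filter (fun q => decide (q ∉ q2)) := fun hm => h2 (List.mem_of_mem_filter hm)
      rw [List.count_eq_zero.2 hz, List.count_filter (by simpa using h2)]
      simp
    rw [hcnt, if_neg (by simpa [List.contains_iff_mem] using h2)]
    simp [pvH, h1]

-- ===== VERDICT (by name: the statement is the Claim_ definition above) =====
theorem compare_time_maps_spec : Claim_equal_compare_time_maps := by
  intro tm1 tm2 _ _
  unfold Spec_compare_time_maps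
  simp only [compare_time_maps, compare_time_maps_alt]
  rw [pv_counter_loop tm1, pv_counter_loop tm2]
  rw [PySem.List.foldl_append_ite, PySem.List.foldl_append_ite, List.nil_append]
  exact pv_core (tm1.filter (fun e => pvOn e)) (tm2.filter (fun e => pvOn e))
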